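-- pv_equiv track=rewrite | github.com/amanjeev/AIND-Sudoku | solution.py | replace_twin_digits
-- ===== SOURCE A (Python) =====
-- def replace_twin_digits(values, single_unit, count_twins, count_vals):
--     """
--     replaces the digits in other bozxes given the twins' digits
--     :param values: value dictionary
--     :param single_unit: a unit of boxes
--     :return: values dictionary updated digits removal
--     """
--     if len(count_twins) > 0:
--         for box in single_unit:  # traverse again, to remove elements
--             # do only boxes that are not the twins
--             if box not in count_twins and len(values[box]) > 2:
--                 for el in count_vals:
--                     for digit in el:
--                         values[box] = values[box].replace(digit, '')  # replace each digit
--     return values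
-- ===== SOURCE B (Python) =====
-- def replace_twin_digits(values, single_unit, count_twins, count_vals):
--     """
--     replaces the digits in other boxes given the twins' digits
--     (single traversal of the values dict itself: the strip-set and the set of
--     target boxes are precomputed once, then each entry is rewritten in one
--     filtering pass; no lookups into values and no per-digit replace loops)
--     """
--     if count_twins:
--         to_remove = set(''.join(count_vals))
--         targets = set(single_unit) - set(count_twins)
--         for box, val in values.items():
--             if box in targets and len(val) > 2:
--                 values[box] = ''.join(c for c in val if c not in to_remove)
--     return values
-- ===== Notes on version B (the rewrite author's own statement) =====
-- stated objective: simpler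
-- what changed: B precomputes the strip-set and the target-box set once and then makes a single traversal over the values dict itself (rewriting each entry in one filtering pass), instead of A's loop over single_unit with repeated dict lookups and nested per-element/per-digit str.replace loops.
-- outside the precondition, e.g. on replace_twin_digits({}, ['a'], ['t'], ['12']): A raises KeyError, B returns {}
import Mathlib
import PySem

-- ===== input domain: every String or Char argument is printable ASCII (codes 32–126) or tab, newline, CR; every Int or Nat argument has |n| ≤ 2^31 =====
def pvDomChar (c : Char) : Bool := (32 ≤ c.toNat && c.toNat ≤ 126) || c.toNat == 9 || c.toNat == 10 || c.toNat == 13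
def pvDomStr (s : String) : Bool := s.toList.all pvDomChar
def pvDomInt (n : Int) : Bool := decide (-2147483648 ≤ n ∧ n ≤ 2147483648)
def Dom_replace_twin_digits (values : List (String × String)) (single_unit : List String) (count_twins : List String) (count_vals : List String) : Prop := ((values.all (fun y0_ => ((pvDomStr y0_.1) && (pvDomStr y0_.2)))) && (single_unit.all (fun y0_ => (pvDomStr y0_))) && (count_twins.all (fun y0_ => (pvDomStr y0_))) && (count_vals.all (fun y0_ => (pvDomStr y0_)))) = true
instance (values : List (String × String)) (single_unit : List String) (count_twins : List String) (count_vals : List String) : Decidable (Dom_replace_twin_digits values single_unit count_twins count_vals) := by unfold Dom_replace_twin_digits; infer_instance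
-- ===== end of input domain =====

set_option maxRecDepth 8000


-- B precomputes the strip-set and target-box set once and traverses the values dict itself in one
-- pass, instead of A's loop over single_unit with nested per-digit replace loops (objective: simpler).
-- Return-value equivalence; A (and B) mutate the values dict in place identically.
-- ===== PORT A =====
def rtd_rem (s : String) (dg : Char) : String :=
  PySem.Str.replace s (String.ofList [dg]) ""

def replace_twin_digits (values : List (String × String)) (single_unit : List String) (count_twins : List String) (count_vals : List String) : List (String × String) :=
  let d0 : PySem.Dict String String := PySem.Dict.ofList values
  let d1 :=
    if count_twins.length > 0 then
      single_unit.foldl (fun d box =>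
        if count_twins.contains box then d
        else
          match PySem.Dict.get? d box with
          | none => d  -- Python raises KeyError here; excluded by Pre_
          | some s =>
            if PySem.Str.len s > 2 then
              PySem.Dict.insert d box
                (count_vals.foldl (fun s el => el.toList.foldl rtd_rem s) s)
            else d) d0
    else d0
  d1.items

-- ===== PORT B =====
def replace_twin_digits_alt (values : List (String × String)) (single_unit : List String) (count_twins : List String) (count_vals : List String) : List (String × String) :=
  let d0 : PySem.Dict String String := PySem.Dict.ofList values
  if count_twins.length > 0 then
    let to_remove : PySem.Set Char := PySem.Set.ofList (PySem.Str.join "" count_vals).toList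
    let targets : PySem.Set String :=
      PySem.Set.diff (PySem.Set.ofList single_unit) (PySem.Set.ofList count_twins)
    d0.items.map (fun kv =>
      if PySem.Set.contains targets kv.1 ∧ PySem.Str.len kv.2 > 2 then
        (kv.1, String.ofList (kv.2.toList.filter (fun c => !(PySem.Set.contains to_remove c))))
      else kv)
  else d0.items

-- ===== PRECONDITION & SPEC =====
-- Pre_ excludes exactly the KeyError inputs: when count_twins is non-empty, every
-- box of single_unit that is not in count_twins must be a key of values.
def Pre_replace_twin_digits (values : List (String × String)) (single_unit : List String) (count_twins : List String) (count_vals : List String) : Prop :=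
  (count_twins.isEmpty || single_unit.all (fun box =>
    count_twins.contains box || (values.map Prod.fst).contains box)) = true
instance (values : List (String × String)) (single_unit : List String) (count_twins : List String) (count_vals : List String) : Decidable (Pre_replace_twin_digits values single_unit count_twins count_vals) := by unfold Pre_replace_twin_digits; infer_instance
def pvWitness_replace_twin_digits : (List (String × String)) × List String × List String × List String :=
  ([("a1", "123"), ("a2", "12")], ["a1", "a2", "b1"], ["b1"], ["12"])

def Spec_replace_twin_digits (values : List (String × String)) (single_unit : List String) (count_twins : List String) (count_vals : List String) (out : List (String × String)) : Prop := out = replace_twin_digits_alt values single_unit count_twins count_vals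
instance (values : List (String × String)) (single_unit : List String) (count_twins : List String) (count_vals : List String) (out : List (String × String)) : Decidable (Spec_replace_twin_digits values single_unit count_twins count_vals out) := by unfold Spec_replace_twin_digits; infer_instance

-- ===== CLAIM (what is proved, stated in full; the proofs are below) =====
def Claim_equal_replace_twin_digits : Prop := ∀ (values : List (String × String)) (single_unit : List String) (count_twins : List String) (count_vals : List String), Dom_replace_twin_digits values single_unit count_twins count_vals → Pre_replace_twin_digits values single_unit count_twins count_vals → Spec_replace_twin_digits values single_unit count_twins count_vals (replace_twin_digits values single_unit count_twins count_vals)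
-- ===== LEMMAS AND PROOFS =====

-- go on a single-char pattern with empty replacement is filter
lemma rtd_go_filter (d : Char) : ∀ (fuel : Nat) (l acc : List Char), l.length ≤ fuel →
    PySem.Chars.replace.go [d] [] fuel l acc = acc.reverse ++ l.filter (fun c => c != d) := by
  intro fuel
  induction fuel with
  | zero =>
    intro l acc h
    simp only [Nat.le_zero, List.length_eq_zero_iff] at h
    simp [h, PySem.Chars.replace.go]
  | succ n ih =>
    intro l acc h
    cases l with
    | nil => simp [PySem.Chars.replace.go]
    | cons c t =>
      simp only [List.length_cons, Nat.add_le_add_iff_right] at h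
      by_cases hc : c = d
      · have hpre : [d].isPrefixOf (c :: t) = true := by simp [List.isPrefixOf, hc]
        simp only [PySem.Chars.replace.go, hpre, List.length_cons,
          List.length_nil, Nat.zero_add, List.drop_succ_cons, List.drop_zero,
          List.reverse_nil, List.nil_append]
        rw [ih t acc h, hc]
        simp only [List.filter_cons, bne_self_eq_false, Bool.false_eq_true, reduceIte]
      · have hdc : (d == c) = false := beq_eq_false_iff_ne.mpr (fun h => hc h.symm)
        have hpre : [d].isPrefixOf (c :: t) = false := by
          show (d == c && List.isPrefixOf [] t) = false
          rw [hdc, Bool.false_and]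
        simp only [PySem.Chars.replace.go, hpre, Bool.false_eq_true, if_false]
        rw [ih t (c :: acc) h]
        simp [hc]

lemma rtd_replace_single (cs : List Char) (d : Char) :
    PySem.Chars.replace cs [d] [] = cs.filter (fun c => c != d) := by
  simp [PySem.Chars.replace, rtd_go_filter d cs.length cs [] (le_refl _)]

lemma rtd_rem_toList (s : String) (d : Char) :
    (rtd_rem s d).toList = s.toList.filter (fun c => c != d) := by
  simp [rtd_rem, PySem.Str.toList_replace, rtd_replace_single]

lemma rtd_fold_chars (ds : List Char) : ∀ (s : String),
    ds.foldl rtd_rem s = String.ofList (s.toList.filter (fun c => !(ds.contains c))) := by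
  induction ds with
  | nil =>
    intro s
    simp only [List.contains_nil, Bool.not_false, List.filter_true]
    simp
  | cons d t ih =>
    intro s
    simp only [List.foldl_cons, ih, rtd_rem_toList, List.filter_filter]
    congr 1
    apply List.filter_congr
    intro c _
    rw [List.contains_cons, Bool.not_or, Bool.and_comm]
    rfl

lemma rtd_join_nil (L : List (List Char)) : PySem.Chars.join [] L = L.flatten := by
  induction L with
  | nil => rfl
  | cons a t ih =>
    cases t with
    | nil => simp [PySem.Chars.join, List.intercalate]
    | cons b r =>
      simp only [PySem.Chars.join, List.intercalate, List.intersperse] at ih ⊢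
      simp_all

-- the filtered value B stores for a box
def rtd_F (count_vals : List String) (s : String) : String :=
  String.ofList (s.toList.filter (fun c =>
    !(PySem.Set.contains (PySem.Set.ofList (PySem.Str.join "" count_vals).toList) c)))

lemma rtd_value_eq (count_vals : List String) (s : String) :
    count_vals.foldl (fun s el => el.toList.foldl rtd_rem s) s = rtd_F count_vals s := by
  have h1 : count_vals.foldl (fun s el => el.toList.foldl rtd_rem s) s
      = ((count_vals.map String.toList).flatten).foldl rtd_rem s := by
    rw [List.foldl_flatten, List.foldl_map]
  rw [h1, rtd_fold_chars]
  unfold rtd_F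
  congr 1
  apply List.filter_congr
  intro c _
  have h2 : (PySem.Str.join "" count_vals).toList = (count_vals.map String.toList).flatten := by
    rw [PySem.Str.toList_join]
    exact rtd_join_nil _
  rw [h2]
  simp only [PySem.Set.contains]
  congr 1
  rw [Bool.eq_iff_iff]
  constructor
  · intro hm
    have : c ∈ (count_vals.map String.toList).flatten := by simpa using hm
    simpa using (PySem.Set.mem_ofList _ c).mpr this
  · intro hm
    have : c ∈ PySem.Set.ofList ((count_vals.map String.toList).flatten) := by simpa using hm
    simpa using (PySem.Set.mem_ofList _ c).mp this

lemma rtd_F_idem (cv : List String) (s : String) : rtd_F cv (rtd_F cv s) = rtd_F cv s := by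
  unfold rtd_F
  simp [List.filter_filter]

-- the per-entry rewrite both programs effect, parametrised by the processed boxes u
def rtd_h (cv tw : List String) (u : List String) (kv : String × String) : String × String :=
  if u.contains kv.1 = true ∧ tw.contains kv.1 = false ∧ PySem.Str.len kv.2 > 2
  then (kv.1, rtd_F cv kv.2) else kv

lemma rtd_h_fst (cv tw u : List String) (kv : String × String) : (rtd_h cv tw u kv).1 = kv.1 := by
  unfold rtd_h; split <;> rfl

-- main loop invariant: folding A's step over `unit` starting from the dict whose entries are
-- items0 rewritten for the processed prefix u yields items0 rewritten for u ++ unit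
lemma rtd_inv (cv tw : List String) (items0 : List (String × String))
    (hnd : (items0.map Prod.fst).Nodup) :
    ∀ (unit u : List String),
    (∀ b ∈ unit, tw.contains b = true ∨ b ∈ items0.map Prod.fst) →
    (unit.foldl (fun d box =>
        if tw.contains box then d
        else
          match PySem.Dict.get? d box with
          | none => d
          | some s =>
            if PySem.Str.len s > 2 then
              PySem.Dict.insert d box (cv.foldl (fun s el => el.toList.foldl rtd_rem s) s)
            else d)
      (PySem.Dict.mk (items0.map (rtd_h cv tw u)))).items
      = items0.map (rtd_h cv tw (u ++ unit)) := by
  intro unit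
  induction unit with
  | nil => intro u _; simp
  | cons b rest ih =>
    intro u hpre
    have hrest : ∀ x ∈ rest, tw.contains x = true ∨ x ∈ items0.map Prod.fst := by
      intro x hx; exact hpre x (List.mem_cons_of_mem _ hx)
    have hassoc : u ++ b :: rest = (u ++ [b]) ++ rest := by simp
    rw [List.foldl_cons, hassoc]
    by_cases htw : tw.contains b = true
    · -- skipped box: the rewrite map does not change
      have hmap : items0.map (rtd_h cv tw u) = items0.map (rtd_h cv tw (u ++ [b])) := by
        apply List.map_congr_left
        intro kv _
        unfold rtd_h
        by_cases hb : kv.1 = b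
        · subst hb
          have hmem : kv.1 ∈ tw := by simpa using htw
          simp [hmem]
        · have : (u ++ [b]).contains kv.1 = u.contains kv.1 := by
            simp [hb]
          simp only [this]
      rw [htw]; simp only [if_true]
      rw [hmap, ih (u ++ [b]) hrest]
    · -- processed box: b is a key of items0
      have hbkey : b ∈ items0.map Prod.fst := by
        rcases hpre b (List.mem_cons_self) with h | h
        · exact absurd h htw
        · exact h
      rcases List.mem_map.mp hbkey with ⟨kv0, hkv0, hfst⟩
      obtain ⟨b', v0⟩ := kv0
      simp only at hfst
      have hfst' : b = b' := hfst.symm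
      subst hfst'
      -- the current dict's keys coincide with items0's keys
      have hkeys : (items0.map (rtd_h cv tw u)).map Prod.fst = items0.map Prod.fst := by
        rw [List.map_map]; apply List.map_congr_left; intro kv _; exact rtd_h_fst cv tw u kv
      have hndm : ((items0.map (rtd_h cv tw u)).map Prod.fst).Nodup := by rw [hkeys]; exact hnd
      -- current stored value at b
      have hw : PySem.Dict.get? (PySem.Dict.mk (items0.map (rtd_h cv tw u))) b
          = some (rtd_h cv tw u (b, v0)).2 := by
        apply PySem.Dict.get?_of_mem_items
        · have : rtd_h cv tw u (b, v0) ∈ items0.map (rtd_h cv tw u) := List.mem_map_of_mem hkv0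
          have hfst' : (rtd_h cv tw u (b, v0)).1 = b := rtd_h_fst cv tw u (b, v0)
          rwa [show ((b : String), (rtd_h cv tw u (b, v0)).2) = rtd_h cv tw u (b, v0) from
            (Prod.ext hfst'.symm rfl)]
        · exact hndm
      have htwf : tw.contains b = false := by
        cases h : tw.contains b
        · rfl
        · exact absurd h htw
      set w := (rtd_h cv tw u (b, v0)).2 with hwdef
      -- w is either v0 (untouched) or rtd_F cv v0 (already filtered)
      have hwcases : (w = v0 ∧ ¬ (u.contains b = true ∧ PySem.Str.len v0 > 2))
          ∨ (w = rtd_F cv v0 ∧ u.contains b = true ∧ PySem.Str.len v0 > 2) := by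
        rw [hwdef]
        unfold rtd_h
        by_cases hcond : u.contains b = true ∧ tw.contains b = false ∧ PySem.Str.len v0 > 2
        · right; rw [if_pos hcond]; exact ⟨rfl, hcond.1, hcond.2.2⟩
        · left; rw [if_neg hcond]
          exact ⟨rfl, fun ⟨h1, h2⟩ => hcond ⟨h1, htwf, h2⟩⟩
      -- pointwise description of the next rewrite map
      have hnext : ∀ kv ∈ items0, rtd_h cv tw (u ++ [b]) kv
          = if kv.1 = b then (if PySem.Str.len v0 > 2 then (b, rtd_F cv v0) else kv)
            else rtd_h cv tw u kv := by
        intro kv hkv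
        by_cases hb : kv.1 = b
        · -- by nodup keys, kv is the entry (b, v0)
          have hkveq : kv = (b, v0) := by
            have h1 : kv.1 = (b, v0).1 := hb
            rcases List.inj_on_of_nodup_map hnd hkv hkv0 h1 with h
            exact h
          subst hkveq
          unfold rtd_h
          have hbtw : b ∉ tw := by simpa using htwf
          simp [hbtw]
        · have : (u ++ [b]).contains kv.1 = u.contains kv.1 := by
            simp [hb]
          simp only [if_neg hb]
          unfold rtd_h
          simp only [this]
      rw [htwf]
      simp only [Bool.false_eq_true, if_false, hw]
      by_cases hlw : PySem.Str.len w > 2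
      · -- length of the stored value exceeds 2: insert the filtered value
        rw [if_pos hlw, rtd_value_eq]
        have hlenv0 : PySem.Str.len v0 > 2 := by
          rcases hwcases with ⟨hew, _⟩ | ⟨_, _, h⟩
          · rwa [hew] at hlw
          · exact h
        have hFw : rtd_F cv w = rtd_F cv v0 := by
          rcases hwcases with ⟨hew, _⟩ | ⟨hew, _, _⟩
          · rw [hew]
          · rw [hew, rtd_F_idem]
        have hcont : PySem.Dict.contains (PySem.Dict.mk (items0.map (rtd_h cv tw u))) b = true := by
          rw [PySem.Dict.contains_eq_isSome_get?, hw]; rfl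
        have hins : (PySem.Dict.insert (PySem.Dict.mk (items0.map (rtd_h cv tw u))) b
              (rtd_F cv w)).items
            = items0.map (rtd_h cv tw (u ++ [b])) := by
          rw [PySem.Dict.items_insert_of_contains _ _ hcont]
          rw [List.map_map]
          apply List.map_congr_left
          intro kv hkv
          rw [hnext kv hkv]
          simp only [Function.comp_apply]
          by_cases hb : kv.1 = b
          · have : (rtd_h cv tw u kv).1 == b := by
              rw [rtd_h_fst]; exact beq_iff_eq.mpr hb
            simp only [this, if_pos, hFw, if_pos hlenv0, hb]
          · have : ((rtd_h cv tw u kv).1 == b) = false := by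
              rw [rtd_h_fst]; exact beq_eq_false_iff_ne.mpr hb
            simp only [this, Bool.false_eq_true, if_false, if_neg hb]
        have hdict : (PySem.Dict.insert (PySem.Dict.mk (items0.map (rtd_h cv tw u))) b
              (rtd_F cv w))
            = PySem.Dict.mk (items0.map (rtd_h cv tw (u ++ [b]))) := by
          apply PySem.Dict.ext
          rw [hins]
        rw [hdict]
        exact ih (u ++ [b]) hrest
      · -- stored value short: no change; the rewrite map also does not change
        simp only [if_neg hlw]
        have hmap : items0.map (rtd_h cv tw u) = items0.map (rtd_h cv tw (u ++ [b])) := by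
          apply List.map_congr_left
          intro kv hkv
          rw [hnext kv hkv]
          by_cases hb : kv.1 = b
          · have hkveq : kv = (b, v0) := by
              rcases List.inj_on_of_nodup_map hnd hkv hkv0 hb with h
              exact h
            subst hkveq
            rw [if_pos rfl]
            by_cases hlen : PySem.Str.len v0 > 2
            · rw [if_pos hlen]
              rcases hwcases with ⟨hew, hnc⟩ | ⟨hew, hu, _⟩
              · exact absurd (show PySem.Str.len w > 2 by rw [hew]; exact hlen) hlw
              · show rtd_h cv tw u (b, v0) = (b, rtd_F cv v0)
                unfold rtd_h
                rw [if_pos ⟨hu, htwf, hlen⟩]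
            · rw [if_neg hlen]
              show rtd_h cv tw u (b, v0) = (b, v0)
              unfold rtd_h
              rw [if_neg (fun h => hlen h.2.2)]
          · simp [if_neg hb]
        rw [hmap, ih (u ++ [b]) hrest]

lemma rtd_h_nil (cv tw : List String) (kv : String × String) : rtd_h cv tw [] kv = kv := by
  unfold rtd_h
  simp

-- B's guard equals the rtd_h guard for the full unit
lemma rtd_guard_eq (single_unit count_twins : List String) (k : String) :
    (PySem.Set.contains (PySem.Set.diff (PySem.Set.ofList single_unit)
        (PySem.Set.ofList count_twins)) k = true)
    ↔ (single_unit.contains k = true ∧ count_twins.contains k = false) := by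
  rw [PySem.Set.contains_iff, PySem.Set.mem_diff]
  constructor
  · rintro ⟨h1, h2⟩
    refine ⟨?_, ?_⟩
    · exact List.elem_eq_true_of_mem ((PySem.Set.mem_ofList _ _).mp h1)
    · cases h : count_twins.contains k
      · rfl
      · exact absurd ((PySem.Set.mem_ofList _ _).mpr (List.mem_of_elem_eq_true h)) h2
  · rintro ⟨h1, h2⟩
    refine ⟨(PySem.Set.mem_ofList _ _).mpr (List.mem_of_elem_eq_true h1), ?_⟩
    intro hm
    have hc : count_twins.contains k = true :=
      List.elem_eq_true_of_mem ((PySem.Set.mem_ofList _ _).mp hm)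
    rw [hc] at h2
    exact Bool.noConfusion h2

theorem replace_twin_digits_spec : Claim_equal_replace_twin_digits := by
  intro values single_unit count_twins count_vals _dom hpre
  unfold Spec_replace_twin_digits replace_twin_digits replace_twin_digits_alt
  set d0 : PySem.Dict String String := PySem.Dict.ofList values with hd0
  by_cases hct : count_twins.length > 0
  · simp only [if_pos hct]
    have hnd : (d0.items.map Prod.fst).Nodup := PySem.Dict.nodup_keys_ofList values
    -- Pre_ gives the key condition for every box of single_unit
    have hpre' : ∀ b ∈ single_unit, count_twins.contains b = true ∨ b ∈ d0.items.map Prod.fst := by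
      unfold Pre_replace_twin_digits at hpre
      have hne : count_twins.isEmpty = false := by
        cases count_twins with
        | nil => simp at hct
        | cons x t => rfl
      rw [hne, Bool.false_or, List.all_eq_true] at hpre
      intro b hb
      have := hpre b hb
      rw [Bool.or_eq_true] at this
      rcases this with h | h
      · exact Or.inl h
      · right
        have hbv : b ∈ values.map Prod.fst := List.mem_of_elem_eq_true h
        have : b ∈ d0.keys := by
          rw [hd0]
          rw [show PySem.Dict.ofList values
              = values.foldl (fun d p => d.insert p.1 p.2) PySem.Dict.empty from rfl]
          rw [show (fun (d : PySem.Dict String String) (p : String × String) => d.insert p.1 p.2)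
              = (fun d p => d.insert (Prod.fst p)
                  ((fun (_ : PySem.Dict String String) (q : String × String) => q.2) d p)) from rfl]
          rw [PySem.Dict.keys_foldl_insert_key, PySem.Dict.keys_empty]
          exact (PySem.Set.mem_ofList _ _).mpr hbv
        exact this
    have hstart : d0 = PySem.Dict.mk (d0.items.map (rtd_h count_vals count_twins [])) := by
      apply PySem.Dict.ext
      have h1 : d0.items.map (rtd_h count_vals count_twins []) = d0.items.map id :=
        List.map_congr_left (fun kv _ => rtd_h_nil _ _ kv)
      rw [h1, List.map_id]
    have hfold := rtd_inv count_vals count_twins d0.items hnd single_unit [] hpre'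
    rw [← hstart] at hfold
    calc (single_unit.foldl _ d0).items
        = d0.items.map (rtd_h count_vals count_twins ([] ++ single_unit)) := hfold
      _ = d0.items.map (fun kv =>
            if PySem.Set.contains (PySem.Set.diff (PySem.Set.ofList single_unit)
                (PySem.Set.ofList count_twins)) kv.1 ∧ PySem.Str.len kv.2 > 2 then
              (kv.1, String.ofList (kv.2.toList.filter (fun c =>
                !(PySem.Set.contains (PySem.Set.ofList (PySem.Str.join "" count_vals).toList) c))))
            else kv) := by
          apply List.map_congr_left
          intro kv _
          unfold rtd_h
          simp only [List.nil_append]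
          by_cases hg : single_unit.contains kv.1 = true ∧ count_twins.contains kv.1 = false ∧
              PySem.Str.len kv.2 > 2
          · rw [if_pos hg, if_pos ⟨(rtd_guard_eq _ _ _).mpr ⟨hg.1, hg.2.1⟩, hg.2.2⟩]
            rfl
          · rw [if_neg hg, if_neg ?_]
            intro ⟨h1, h2⟩
            rcases (rtd_guard_eq _ _ _).mp h1 with ⟨h3, h4⟩
            exact hg ⟨h3, h4, h2⟩
  · simp only [if_neg hct]
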